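-- pv_equiv track=rewrite | github.com/sahiti3636/NLP_FINAL_PROJECT | dream_pipeline_p.py | extract_semantic_relations
-- ===== SOURCE A (Python) =====
-- from typing import Dict, List, Tuple
--
-- def extract_semantic_relations(tokens: List[str], srl_roles: List[str]) -> List[dict]:
--     """Extract Agent-Action-Target triplets from SRL tags."""
--     relations = []
--     current_relation = {"agent": None, "action": None, "target": None}
--
--     for i, (token, role) in enumerate(zip(tokens, srl_roles)):
--         if role == "V":
--             # Save previous relation if exists
--             if current_relation["action"]:
--                 relations.append(current_relation.copy())
--                 current_relation = {"agent": None, "action": None, "target": None}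
--             current_relation["action"] = token
--         elif role == "ARG0":
--             current_relation["agent"] = token if not current_relation["agent"] else current_relation["agent"] + " " + token
--         elif role == "ARG1":
--             current_relation["target"] = token if not current_relation["target"] else current_relation["target"] + " " + token
--
--     # Add final relation
--     if current_relation["action"]:
--         relations.append(current_relation)
--
--     return relations if relations else [{"agent": "Unknown", "action": "Unknown", "target": "Unknown"}]
-- ===== SOURCE B (Python) =====
-- def extract_semantic_relations(tokens, srl_roles):
--     """Extract Agent-Action-Target triplets from SRL tags.
--
--     Single reversed scan: token lists are accumulated per segment and a
--     relation is emitted (front of the list) at each verb; leftover tokens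
--     before the first verb are merged into the first relation.
--     """
--     ag, tg, rels = [], [], []
--     for t, r in reversed(list(zip(tokens, srl_roles))):
--         if r == "V":
--             rels = [(ag, t, tg)] + rels
--             ag, tg = [], []
--         elif r == "ARG0":
--             ag = [t] + ag
--         elif r == "ARG1":
--             tg = [t] + tg
--     if not rels:
--         return [{"agent": "Unknown", "action": "Unknown", "target": "Unknown"}]
--     (a0, v0, t0), rest = rels[0], rels[1:]
--     rels = [(ag + a0, v0, tg + t0)] + rest
--     return [
--         {
--             "agent": " ".join(a) if a else None,
--             "action": v,
--             "target": " ".join(g) if g else None,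
--         }
--         for a, v, g in rels
--     ]
-- ===== Notes on version B (the rewrite author's own statement) =====
-- stated objective: alternative
-- what changed: A's forward stateful scan that grows agent/action/target strings with Python-truthiness tests is replaced by a single reversed scan that collects per-segment token lists, emits relations back-to-front at each verb, merges the pre-first-verb leftovers into the first relation and joins at the end.
import Mathlib
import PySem

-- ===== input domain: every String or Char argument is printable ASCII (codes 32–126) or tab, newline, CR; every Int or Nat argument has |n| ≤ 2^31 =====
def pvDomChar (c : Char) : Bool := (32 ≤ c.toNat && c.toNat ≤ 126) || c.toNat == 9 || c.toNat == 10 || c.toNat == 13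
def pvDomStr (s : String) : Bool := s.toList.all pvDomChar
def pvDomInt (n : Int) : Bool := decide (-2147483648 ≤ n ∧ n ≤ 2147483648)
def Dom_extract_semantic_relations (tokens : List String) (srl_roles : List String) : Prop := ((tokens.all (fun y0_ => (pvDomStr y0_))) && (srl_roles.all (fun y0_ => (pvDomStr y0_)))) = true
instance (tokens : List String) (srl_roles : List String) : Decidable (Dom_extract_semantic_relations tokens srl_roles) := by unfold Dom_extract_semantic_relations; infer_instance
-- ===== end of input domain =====

-- B replaces A's forward stateful scan (string concatenation + Python truthiness) by a single
-- reversed scan that builds the relation list back-to-front from per-segment token lists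
-- (objective: alternative decomposition, same O(n) cost).

-- ===== PORT A =====
-- Python truthiness of an Optional[str]: None and "" are falsy.
def pyTruthyOpt (o : Option String) : Bool :=
  match o with
  | none => false
  | some s => !(s == "")

-- the dict {"agent": ag, "action": ac, "target": tg} in insertion order
def relDict (ag ac tg : Option String) : List (String × Option String) :=
  [("agent", ag), ("action", ac), ("target", tg)]

-- the default [{"agent":"Unknown","action":"Unknown","target":"Unknown"}] entry
def unknownRel : List (String × Option String) :=
  [("agent", some "Unknown"), ("action", some "Unknown"), ("target", some "Unknown")]

-- one iteration of A's for-loop; state = (relations, agent, action, target)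
def aStep (st : List (List (String × Option String)) × Option String × Option String × Option String)
    (pr : String × String) :
    List (List (String × Option String)) × Option String × Option String × Option String :=
  if pr.2 == "V" then
    if pyTruthyOpt st.2.2.1 then
      (st.1 ++ [relDict st.2.1 st.2.2.1 st.2.2.2], none, some pr.1, none)
    else
      (st.1, st.2.1, some pr.1, st.2.2.2)
  else if pr.2 == "ARG0" then
    (st.1, some (if pyTruthyOpt st.2.1 then (st.2.1).getD "" ++ " " ++ pr.1 else pr.1), st.2.2.1, st.2.2.2)
  else if pr.2 == "ARG1" then
    (st.1, st.2.1, st.2.2.1, some (if pyTruthyOpt st.2.2.2 then (st.2.2.2).getD "" ++ " " ++ pr.1 else pr.1))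
  else st

def extract_semantic_relations (tokens : List String) (srl_roles : List String) :
    List (List (String × Option String)) :=
  let s := (tokens.zip srl_roles).foldl aStep ([], none, none, none)
  let rels := if pyTruthyOpt s.2.2.1 then s.1 ++ [relDict s.2.1 s.2.2.1 s.2.2.2] else s.1
  if rels.isEmpty then [unknownRel] else rels

-- ===== PORT B =====
-- the reversed for-loop of Source B as structural recursion (foldr);
-- result = (agent tokens, target tokens accumulated so far, relations as (agent toks, verb, target toks))
def bGo : List (String × String) →
    List String × List String × List (List String × String × List String)
  | [] => ([], [], [])
  | pr :: rest =>
    let s := bGo rest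
    if pr.2 == "V" then ([], [], (s.1, pr.1, s.2.1) :: s.2.2)
    else if pr.2 == "ARG0" then (pr.1 :: s.1, s.2.1, s.2.2)
    else if pr.2 == "ARG1" then (s.1, pr.1 :: s.2.1, s.2.2)
    else s

-- " ".join(xs): hand port of str.join for a space separator (exact on all strings)
def joinSp : List String → String
  | [] => ""
  | x :: xs => xs.foldl (fun a t => a ++ " " ++ t) x

-- '" ".join(xs) if xs else None'
def joinOpt (xs : List String) : Option String :=
  if xs.isEmpty then none else some (joinSp xs)

def bRel (r : List String × String × List String) : List (String × Option String) :=
  [("agent", joinOpt r.1), ("action", some r.2.1), ("target", joinOpt r.2.2)]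

-- Source B after the loop: merge the leftover tokens into the first relation and render the dicts
def bFinish (s : List String × List String × List (List String × String × List String)) :
    List (List (String × Option String)) :=
  match s.2.2 with
  | [] => [unknownRel]
  | (a0, v0, t0) :: rest => ((s.1 ++ a0, v0, s.2.1 ++ t0) :: rest).map bRel

def extract_semantic_relations_alt (tokens : List String) (srl_roles : List String) :
    List (List (String × Option String)) :=
  bFinish (bGo (tokens.zip srl_roles))

-- ===== PRECONDITION & SPEC =====
-- Pre_ excludes inputs that pair an empty-string token with a V/ARG0/ARG1 tag while some verb
-- is present: on that degenerate corner (no tokenizer emits empty tokens) A's truthiness tests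
-- read the empty token as 'no value yet' while B keeps it as a token — neither reading is
-- specified, so the corner is left outside the claim.
def Pre_extract_semantic_relations (tokens : List String) (srl_roles : List String) : Prop :=
  (∃ p ∈ tokens.zip srl_roles, p.2 = "V") →
    (∀ p ∈ tokens.zip srl_roles, (p.2 = "V" ∨ p.2 = "ARG0" ∨ p.2 = "ARG1") → p.1 ≠ "")
instance (tokens : List String) (srl_roles : List String) :
    Decidable (Pre_extract_semantic_relations tokens srl_roles) := by
  unfold Pre_extract_semantic_relations; infer_instance

def pvWitness_extract_semantic_relations : List String × List String :=
  (["I", "ate", "an", "apple"], ["ARG0", "V", "O", "ARG1"])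

def Spec_extract_semantic_relations (tokens : List String) (srl_roles : List String)
    (out : List (List (String × Option String))) : Prop :=
  out = extract_semantic_relations_alt tokens srl_roles
instance (tokens : List String) (srl_roles : List String) (out : List (List (String × Option String))) :
    Decidable (Spec_extract_semantic_relations tokens srl_roles out) := by
  unfold Spec_extract_semantic_relations; infer_instance

-- ===== CLAIM (what is proved, stated in full; the proofs are below) =====
def Claim_equal_extract_semantic_relations : Prop := ∀ (tokens : List String) (srl_roles : List String), Dom_extract_semantic_relations tokens srl_roles → Pre_extract_semantic_relations tokens srl_roles → Spec_extract_semantic_relations tokens srl_roles (extract_semantic_relations tokens srl_roles)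

-- ===== LEMMAS AND PROOFS =====

-- A's loop followed by the final flush, as a function of the pair list and the entry state
def Arun (ps : List (String × String))
    (st : List (List (String × Option String)) × Option String × Option String × Option String) :
    List (List (String × Option String)) :=
  let s := ps.foldl aStep st
  if pyTruthyOpt s.2.2.1 then s.1 ++ [relDict s.2.1 s.2.2.1 s.2.2.2] else s.1

-- A's accumulation of one more batch of role tokens onto an agent/target slot
def ext (o : Option String) (xs : List String) : Option String :=
  xs.foldl (fun a t => some (if pyTruthyOpt a then a.getD "" ++ " " ++ t else t)) o

lemma Arun_cons (p : String × String) (ps : List (String × String)) (st) :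
    Arun (p :: ps) st = Arun ps (aStep st p) := rfl

lemma A_eq_Arun (tokens srl_roles : List String) :
    extract_semantic_relations tokens srl_roles =
      (if (Arun (tokens.zip srl_roles) ([], none, none, none)).isEmpty then [unknownRel]
       else Arun (tokens.zip srl_roles) ([], none, none, none)) := rfl

lemma append_ne_empty (a t : String) : a ++ " " ++ t ≠ "" := by
  intro h
  have : (a ++ " " ++ t).length = 0 := by rw [h]; rfl
  simp [String.length_append] at this

lemma ext_some (ts : List String) : ∀ s : String, s ≠ "" →
    ext (some s) ts = some (joinSp (s :: ts)) := by
  induction ts with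
  | nil => intro s hs; simp [ext, joinSp]
  | cons t ts ih =>
    intro s hs
    have h1 : pyTruthyOpt (some s) = true := by simp [pyTruthyOpt, hs]
    have h2 : ext (some s) (t :: ts) = ext (some (s ++ " " ++ t)) ts := by
      simp [ext, h1]
    rw [h2, ih _ (append_ne_empty s t)]
    simp [joinSp]

lemma ext_none (xs : List String) (h : ∀ t ∈ xs, t ≠ "") :
    ext none xs = joinOpt xs := by
  cases xs with
  | nil => simp [ext, joinOpt]
  | cons t ts =>
    have h1 : ext none (t :: ts) = ext (some t) ts := by simp [ext, pyTruthyOpt]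
    rw [h1, ext_some ts t (h t (by simp))]
    simp [joinOpt]

-- a slot holds None or a nonempty string
def Islot (o : Option String) : Prop := ∀ s, o = some s → s ≠ ""

-- no verb among the pairs: A's action slot never becomes truthy, so nothing is ever appended
lemma Arun_noV (ps : List (String × String)) (h : ∀ p ∈ ps, p.2 ≠ "V") :
    ∀ st, pyTruthyOpt st.2.2.1 = false → Arun ps st = st.1 := by
  induction ps with
  | nil => intro st hst; simp [Arun, hst]
  | cons p ps ih =>
    intro st hst
    have hp : p.2 ≠ "V" := h p (by simp)
    rw [Arun_cons]
    have hrest : ∀ q ∈ ps, q.2 ≠ "V" := fun q hq => h q (by simp [hq])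
    by_cases h0 : p.2 = "ARG0"
    · have e : aStep st p =
          (st.1, some (if pyTruthyOpt st.2.1 then (st.2.1).getD "" ++ " " ++ p.1 else p.1),
            st.2.2.1, st.2.2.2) := by
        simp [aStep, hp, h0]
      rw [e]; exact ih hrest _ hst
    · by_cases h1 : p.2 = "ARG1"
      · have e : aStep st p =
            (st.1, st.2.1, st.2.2.1,
              some (if pyTruthyOpt st.2.2.2 then (st.2.2.2).getD "" ++ " " ++ p.1 else p.1)) := by
          simp [aStep, hp, h0, h1]
        rw [e]; exact ih hrest _ hst
      · have e : aStep st p = st := by simp [aStep, hp, h0, h1]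
        rw [e]; exact ih hrest _ hst

lemma bGo_rels_nil_iff (ps : List (String × String)) :
    (bGo ps).2.2 = [] ↔ ∀ p ∈ ps, p.2 ≠ "V" := by
  induction ps with
  | nil => simp [bGo]
  | cons p ps ih =>
    by_cases hV : p.2 = "V"
    · simp [bGo, hV]
    · by_cases h0 : p.2 = "ARG0"
      · simpa [bGo, hV, h0] using ih
      · by_cases h1 : p.2 = "ARG1"
        · simpa [bGo, hV, h0, h1] using ih
        · simpa [bGo, hV, h0, h1] using ih

-- tokens collected by bGo all come from V/ARG0/ARG1-tagged pairs, hence are nonempty under Hne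
lemma bGo_ne (ps : List (String × String))
    (H : ∀ p ∈ ps, (p.2 = "V" ∨ p.2 = "ARG0" ∨ p.2 = "ARG1") → p.1 ≠ "") :
    (∀ t ∈ (bGo ps).1, t ≠ "") ∧ (∀ t ∈ (bGo ps).2.1, t ≠ "") ∧
    (∀ r ∈ (bGo ps).2.2, (∀ t ∈ r.1, t ≠ "") ∧ r.2.1 ≠ "" ∧ (∀ t ∈ r.2.2, t ≠ "")) := by
  induction ps with
  | nil => simp [bGo]
  | cons p ps ih =>
    have Hrest : ∀ q ∈ ps, (q.2 = "V" ∨ q.2 = "ARG0" ∨ q.2 = "ARG1") → q.1 ≠ "" :=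
      fun q hq => H q (by simp [hq])
    obtain ⟨iag, itg, irel⟩ := ih Hrest
    by_cases hV : p.2 = "V"
    · have hp : p.1 ≠ "" := H p (by simp) (Or.inl hV)
      have e : bGo (p :: ps) = ([], [], ((bGo ps).1, p.1, (bGo ps).2.1) :: (bGo ps).2.2) := by
        simp [bGo, hV]
      rw [e]
      refine ⟨by simp, by simp, ?_⟩
      intro r hr
      rcases List.mem_cons.1 hr with h | h
      · subst h; exact ⟨iag, hp, itg⟩
      · exact irel r h
    · by_cases h0 : p.2 = "ARG0"
      · have hp : p.1 ≠ "" := H p (by simp) (Or.inr (Or.inl h0))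
        have e : bGo (p :: ps) = (p.1 :: (bGo ps).1, (bGo ps).2.1, (bGo ps).2.2) := by
          simp [bGo, hV, h0]
        rw [e]
        refine ⟨?_, itg, irel⟩
        intro t ht
        rcases List.mem_cons.1 ht with h | h
        · subst h; exact hp
        · exact iag t h
      · by_cases h1 : p.2 = "ARG1"
        · have hp : p.1 ≠ "" := H p (by simp) (Or.inr (Or.inr h1))
          have e : bGo (p :: ps) = ((bGo ps).1, p.1 :: (bGo ps).2.1, (bGo ps).2.2) := by
            simp [bGo, hV, h0, h1]
          rw [e]
          refine ⟨iag, ?_, irel⟩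
          intro t ht
          rcases List.mem_cons.1 ht with h | h
          · subst h; exact hp
          · exact itg t h
        · have e : bGo (p :: ps) = bGo ps := by simp [bGo, hV, h0, h1]
          rw [e]
          exact ⟨iag, itg, irel⟩

-- the main invariant: A's loop-plus-flush, started in any consistent state, produces B's
-- segment relations (stated for a truthy pending action, and for a falsy one)
lemma Arun_main (ps : List (String × String))
    (H : ∀ p ∈ ps, (p.2 = "V" ∨ p.2 = "ARG0" ∨ p.2 = "ARG1") → p.1 ≠ "") :
    ∀ (rels : List (List (String × Option String))) (ag tg : Option String),
      Islot ag → Islot tg →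
      ((∀ a : String, a ≠ "" →
          Arun ps (rels, ag, some a, tg) =
            rels ++ relDict (ext ag (bGo ps).1) (some a) (ext tg (bGo ps).2.1)
              :: ((bGo ps).2.2).map bRel)
      ∧ (∀ ac : Option String, pyTruthyOpt ac = false →
          Arun ps (rels, ag, ac, tg) =
            match (bGo ps).2.2 with
            | [] => rels
            | (a1, v1, t1) :: rest =>
                rels ++ relDict (ext ag ((bGo ps).1 ++ a1)) (some v1)
                  (ext tg ((bGo ps).2.1 ++ t1)) :: rest.map bRel)) := by
  induction ps with
  | nil =>
    intro rels ag tg hag htg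
    constructor
    · intro a ha
      simp [Arun, bGo, ext, relDict, pyTruthyOpt, ha]
    · intro ac hac
      simp [Arun, bGo, hac]
  | cons p ps ih =>
    intro rels ag tg hag htg
    have Hrest : ∀ q ∈ ps, (q.2 = "V" ∨ q.2 = "ARG0" ∨ q.2 = "ARG1") → q.1 ≠ "" :=
      fun q hq => H q (by simp [hq])
    obtain ⟨bag, btg, brel⟩ := bGo_ne ps Hrest
    by_cases hV : p.2 = "V"
    · have hp : p.1 ≠ "" := H p (by simp) (Or.inl hV)
      constructor
      · intro a ha
        have hstep : aStep (rels, ag, some a, tg) p =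
            (rels ++ [relDict ag (some a) tg], none, some p.1, none) := by
          simp [aStep, hV, pyTruthyOpt, ha]
        rw [Arun_cons, hstep,
          ((ih Hrest (rels ++ [relDict ag (some a) tg]) none none
            (fun _ h => by cases h) (fun _ h => by cases h)).1 p.1 hp)]
        rw [ext_none _ bag, ext_none _ btg]
        simp [bGo, hV, bRel, relDict, ext]
      · intro ac hac
        have hstep : aStep (rels, ag, ac, tg) p = (rels, ag, some p.1, tg) := by
          simp [aStep, hV, hac]
        rw [Arun_cons, hstep, ((ih Hrest rels ag tg hag htg).1 p.1 hp)]
        simp [bGo, hV]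
    · by_cases h0 : p.2 = "ARG0"
      · have hp : p.1 ≠ "" := H p (by simp) (Or.inr (Or.inl h0))
        have hag' : Islot (some (if pyTruthyOpt ag then ag.getD "" ++ " " ++ p.1 else p.1)) := by
          intro s hs; cases hs
          split
          · exact append_ne_empty _ _
          · exact hp
        have hext : ∀ xs : List String,
            ext (some (if pyTruthyOpt ag then ag.getD "" ++ " " ++ p.1 else p.1)) xs =
              ext ag (p.1 :: xs) := by
          intro xs; simp [ext]
        constructor
        · intro a ha
          have hstep : aStep (rels, ag, some a, tg) p =
              (rels, some (if pyTruthyOpt ag then ag.getD "" ++ " " ++ p.1 else p.1), some a, tg) := by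
            simp [aStep, hV, h0]
          rw [Arun_cons, hstep, ((ih Hrest rels _ tg hag' htg).1 a ha), hext]
          simp [bGo, hV, h0]
        · intro ac hac
          have hstep : aStep (rels, ag, ac, tg) p =
              (rels, some (if pyTruthyOpt ag then ag.getD "" ++ " " ++ p.1 else p.1), ac, tg) := by
            simp [aStep, hV, h0]
          rw [Arun_cons, hstep, ((ih Hrest rels _ tg hag' htg).2 ac hac)]
          cases hrels : (bGo ps).2.2 with
          | nil => simp [bGo, hV, h0, hrels]
          | cons r rest => simp [bGo, hV, h0, hrels, hext]
      · by_cases h1 : p.2 = "ARG1"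
        · have hp : p.1 ≠ "" := H p (by simp) (Or.inr (Or.inr h1))
          have htg' : Islot (some (if pyTruthyOpt tg then tg.getD "" ++ " " ++ p.1 else p.1)) := by
            intro s hs; cases hs
            split
            · exact append_ne_empty _ _
            · exact hp
          have hext : ∀ xs : List String,
              ext (some (if pyTruthyOpt tg then tg.getD "" ++ " " ++ p.1 else p.1)) xs =
                ext tg (p.1 :: xs) := by
            intro xs; simp [ext]
          constructor
          · intro a ha
            have hstep : aStep (rels, ag, some a, tg) p =
                (rels, ag, some a, some (if pyTruthyOpt tg then tg.getD "" ++ " " ++ p.1 else p.1)) := by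
              simp [aStep, hV, h0, h1]
            rw [Arun_cons, hstep, ((ih Hrest rels ag _ hag htg').1 a ha), hext]
            simp [bGo, hV, h0, h1]
          · intro ac hac
            have hstep : aStep (rels, ag, ac, tg) p =
                (rels, ag, ac, some (if pyTruthyOpt tg then tg.getD "" ++ " " ++ p.1 else p.1)) := by
              simp [aStep, hV, h0, h1]
            rw [Arun_cons, hstep, ((ih Hrest rels ag _ hag htg').2 ac hac)]
            cases hrels : (bGo ps).2.2 with
            | nil => simp [bGo, hV, h0, h1, hrels]
            | cons r rest => simp [bGo, hV, h0, h1, hrels, hext]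
        · have hstep : ∀ ac, aStep (rels, ag, ac, tg) p = (rels, ag, ac, tg) := by
            intro ac; simp [aStep, hV, h0, h1]
          constructor
          · intro a ha
            rw [Arun_cons, hstep, ((ih Hrest rels ag tg hag htg).1 a ha)]
            simp [bGo, hV, h0, h1]
          · intro ac hac
            rw [Arun_cons, hstep, ((ih Hrest rels ag tg hag htg).2 ac hac)]
            simp [bGo, hV, h0, h1]

-- ===== VERDICT (by name: the statement is the Claim_ definition above) =====
theorem extract_semantic_relations_spec : Claim_equal_extract_semantic_relations := by
  intro tokens srl_roles _hdom hpre
  show extract_semantic_relations tokens srl_roles = extract_semantic_relations_alt tokens srl_roles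
  set ps := tokens.zip srl_roles with hps
  by_cases hV : ∃ p ∈ ps, p.2 = "V"
  · -- some verb exists; by Pre_, every V/ARG0/ARG1-tagged token is nonempty
    have H : ∀ p ∈ ps, (p.2 = "V" ∨ p.2 = "ARG0" ∨ p.2 = "ARG1") → p.1 ≠ "" := hpre hV
    have hne : (bGo ps).2.2 ≠ [] := by
      intro h
      obtain ⟨p, hp, hpv⟩ := hV
      exact (bGo_rels_nil_iff ps).1 h p hp hpv
    obtain ⟨bag, btg, brel⟩ := bGo_ne ps H
    obtain ⟨r1, rest, hrels⟩ := List.exists_cons_of_ne_nil hne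
    obtain ⟨a1, v1, t1⟩ := r1
    have hmain := (Arun_main ps H [] none none (fun _ h => by cases h) (fun _ h => by cases h)).2
      none rfl
    rw [hrels] at hmain
    have hA : Arun ps ([], none, none, none) =
        relDict (ext none ((bGo ps).1 ++ a1)) (some v1) (ext none ((bGo ps).2.1 ++ t1))
          :: rest.map bRel := by
      simpa using hmain
    have hhd := brel (a1, v1, t1) (by rw [hrels]; simp)
    have hag : ext none ((bGo ps).1 ++ a1) = joinOpt ((bGo ps).1 ++ a1) := by
      apply ext_none
      intro t ht
      rcases List.mem_append.1 ht with h | h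
      · exact bag t h
      · exact hhd.1 t h
    have htg : ext none ((bGo ps).2.1 ++ t1) = joinOpt ((bGo ps).2.1 ++ t1) := by
      apply ext_none
      intro t ht
      rcases List.mem_append.1 ht with h | h
      · exact btg t h
      · exact hhd.2.2 t h
    rw [A_eq_Arun, ← hps, hA]
    simp only [List.isEmpty_cons, Bool.false_eq_true, if_false]
    show _ = bFinish (bGo ps)
    rcases e : bGo ps with ⟨AG, TG, RELS⟩
    rw [e] at hrels hag htg
    simp only at hrels hag htg
    simp [bFinish, hrels, hag, htg, relDict, bRel]
  · -- no verb at all: A flushes nothing and B collects no relation; both return the default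
    have hA : Arun ps ([], none, none, none) = [] := by
      apply Arun_noV
      · intro p hp hpv
        exact hV ⟨p, hp, hpv⟩
      · rfl
    have hB : (bGo ps).2.2 = [] := by
      apply (bGo_rels_nil_iff ps).2
      intro p hp hpv
      exact hV ⟨p, hp, hpv⟩
    rw [A_eq_Arun, ← hps, hA]
    show _ = bFinish (bGo ps)
    rcases e : bGo ps with ⟨AG, TG, RELS⟩
    rw [e] at hB
    simp only at hB
    simp [bFinish, hB]
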